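-- pv_equiv track=rewrite | github.com/eya46/codes | 力扣/LCP 51/a.py | perfectMenu
-- ===== SOURCE A (Python) =====
-- from typing import List
--
-- def perfectMenu(
--         materials: List[int], cookbooks: List[List[int]], attribute: List[List[int]], limit: int
-- ) -> int:
--     n = len(cookbooks)
--     res = [-1]
--     path = []
--
--     def dfs(i):
--         # 检查当前料理需求是否超过食材数量
--         for left, use in zip(materials, [sum(__) for __ in zip(*[cookbooks[_] for _ in path])]):
--             if use > left:
--                 return
--
--         # 检查是否满足饱腹感, 满足则添加
--         if len(path) > 0 and sum(attribute[_][1] for _ in path) >= limit: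
--             res.append(sum(attribute[_][0] for _ in path))
--
--         # 没得选了
--         if i + 1 > n:
--             return
--
--         # 选i下标的料理
--         path.append(i)
--         dfs(i + 1)
--         path.pop()
--
--         # 不选i下标的料理
--         dfs(i + 1)
--
--     dfs(0)
--
--     return max(res)
-- ===== SOURCE B (Python) =====
-- def perfectMenu(materials, cookbooks, attribute, limit):
--     n = len(cookbooks)
--     best = -1
--
--     def pick(j, sums, sat, delic):
--         # state after adding cookbook j to the current selection
--         nonlocal best
--         sums = [s + c for s, c in zip(sums, cookbooks[j])]
--         sat += attribute[j][1]
--         delic += attribute[j][0]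
--         if any(use > left for left, use in zip(materials, sums)):
--             return
--         if sat >= limit and delic > best:
--             best = delic
--         for k in range(j + 1, n):
--             pick(k, sums, sat, delic)
--
--     start = [0] * len(materials)
--     for i in range(n):
--         pick(i, start, 0, 0)
--     return best
-- ===== Notes on version B (the rewrite author's own statement) =====
-- stated objective: faster
-- what changed: Instead of A's include/exclude recursion that keeps a path list and at every node rebuilds the selected rows, zip-transposes and re-sums every column and both attributes into a result list, B enumerates subsets with a pick-next-index loop, maintains the zip-combined column sums and the two attribute sums incrementally, and keeps a running max; intended as faster (per-node work drops from O((n+m)*|path|) to O(n+m)), measured about 4-5x in a timing run, with A timing out where B returned in one input family but not confirmed in another. …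
-- outside the precondition, e.g. on perfectMenu([0], [[1]], [], 0): A returns -1, B raises IndexError; on perfectMenu([0], [[1]], [[5]], 10): A returns -1, B raises IndexError
import Mathlib
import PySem

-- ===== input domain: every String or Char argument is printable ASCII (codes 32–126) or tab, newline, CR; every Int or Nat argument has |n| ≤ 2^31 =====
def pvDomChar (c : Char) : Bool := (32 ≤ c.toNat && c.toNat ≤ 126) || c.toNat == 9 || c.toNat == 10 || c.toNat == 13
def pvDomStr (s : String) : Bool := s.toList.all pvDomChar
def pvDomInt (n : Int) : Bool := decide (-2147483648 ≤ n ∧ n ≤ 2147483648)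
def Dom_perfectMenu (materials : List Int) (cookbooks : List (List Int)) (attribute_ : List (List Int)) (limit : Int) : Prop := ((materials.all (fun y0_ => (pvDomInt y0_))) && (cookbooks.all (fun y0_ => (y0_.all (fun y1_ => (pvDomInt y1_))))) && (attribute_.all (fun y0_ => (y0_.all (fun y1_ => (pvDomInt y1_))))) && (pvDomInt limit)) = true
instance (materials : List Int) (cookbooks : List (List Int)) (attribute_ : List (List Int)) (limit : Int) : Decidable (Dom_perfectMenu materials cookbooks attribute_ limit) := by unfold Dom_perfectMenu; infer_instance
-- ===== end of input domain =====

-- B replaces A's include/exclude recursion (path list, per-node zip-transpose re-summing into a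
-- result list) by a pick-next-index subset enumeration with incrementally maintained zip-combined
-- column sums, incremental attribute sums and a running max; intended as faster (less work per
-- node; a timing run measured about 4-5x, confirmed on one input family only).


-- ===== PORT A =====
-- port of [sum(__) for __ in zip(*rows)] : transpose (truncating to the shortest row, empty
-- for no rows, exactly Python's zip) and sum each column
def zipStarSums (rows : List (List Int)) : List Int :=
  match rows with
  | [] => []
  | r :: rs =>
    (List.range (rs.foldl (fun acc row => min acc row.length) r.length)).map
      (fun j => (r :: rs).foldl (fun acc row => acc + row.getD j 0) 0)

-- the nested dfs of A; `res` and `path` are threaded functionally, fuel = n+1-i is always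
-- sufficient at the call site.  Indices in `path` are always < cookbooks.length, and inside
-- Pre_ the attribute rows are long enough, so the `getD` defaults never fire there.
def dfsA (materials : List Int) (cookbooks attribute_ : List (List Int)) (limit : Int) (n : Nat) :
    Nat → Nat → List Nat → List Int → List Int
  | 0, _, _, res => res
  | fuel + 1, i, path, res =>
    if (materials.zip (zipStarSums (path.map (fun a => cookbooks.getD a [])))).any
        (fun p => p.1 < p.2) then res
    else
      let res := if 0 < path.length ∧ limit ≤ (path.map (fun a => (attribute_.getD a []).getD 1 0)).sum
                 then res ++ [(path.map (fun a => (attribute_.getD a []).getD 0 0)).sum] else res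
      if n < i + 1 then res
      else
        dfsA materials cookbooks attribute_ limit n fuel (i + 1) path
          (dfsA materials cookbooks attribute_ limit n fuel (i + 1) (path ++ [i]) res)

def perfectMenu (materials : List Int) (cookbooks : List (List Int)) (attribute_ : List (List Int)) (limit : Int) : Int :=
  let n := cookbooks.length
  (PySem.List.max? (dfsA materials cookbooks attribute_ limit n (n + 1) 0 [] [-1]) (fun y => y)).getD 0

-- ===== PORT B =====
-- [s + c for s, c in zip(sums, row)]
def addZip : List Int → List Int → List Int
  | s :: ss, c :: cc => (s + c) :: addZip ss cc
  | _, _ => []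

-- B's `pick(j, sums, sat, delic)` with the running `best` threaded; fuel ≥ n - j is always
-- sufficient at the call sites (indices picked strictly increase).
def pickB (materials : List Int) (cookbooks attribute_ : List (List Int)) (limit : Int) (n : Nat) :
    Nat → Nat → List Int → Int → Int → Int → Int
  | 0, _, _, _, _, best => best
  | fuel + 1, j, sums, sat, delic, best =>
    let sums' := addZip sums (cookbooks.getD j [])
    let sat' := sat + (attribute_.getD j []).getD 1 0
    let delic' := delic + (attribute_.getD j []).getD 0 0
    if (materials.zip sums').any (fun q => q.1 < q.2) then best
    else
      let best' := if limit ≤ sat' ∧ best < delic' then delic' else best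
      (List.range' (j + 1) (n - (j + 1))).foldl
        (fun b k => pickB materials cookbooks attribute_ limit n fuel k sums' sat' delic' b) best'

def perfectMenu_alt (materials : List Int) (cookbooks : List (List Int)) (attribute_ : List (List Int)) (limit : Int) : Int :=
  let n := cookbooks.length
  (List.range' 0 n).foldl
    (fun b i => pickB materials cookbooks attribute_ limit n n i
      (List.replicate materials.length 0) 0 0 b) (-1)

-- ===== PRECONDITION & SPEC =====
-- Pre_ excludes malformed `attribute` (fewer rows than cookbooks, or a row with fewer than 2
-- entries): there A raises IndexError whenever some non-pruned nonempty subset reaches such a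
-- row, and B's eager attribute access raises on any such input with n > 0; on the remaining
-- such inputs (every subset pruned) A returns -1 while B still raises IndexError.
def Pre_perfectMenu (materials : List Int) (cookbooks : List (List Int)) (attribute_ : List (List Int)) (limit : Int) : Prop :=
  cookbooks.length ≤ attribute_.length ∧ ∀ row ∈ attribute_.take cookbooks.length, 2 ≤ row.length
instance (materials : List Int) (cookbooks : List (List Int)) (attribute_ : List (List Int)) (limit : Int) : Decidable (Pre_perfectMenu materials cookbooks attribute_ limit) := by unfold Pre_perfectMenu; infer_instance
def pvWitness_perfectMenu : List Int × List (List Int) × List (List Int) × Int :=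
  ([3], [[2], [1]], [[5, 1], [3, 2]], 1)
def Spec_perfectMenu (materials : List Int) (cookbooks : List (List Int)) (attribute_ : List (List Int)) (limit : Int) (out : Int) : Prop := out = perfectMenu_alt materials cookbooks attribute_ limit
instance (materials : List Int) (cookbooks : List (List Int)) (attribute_ : List (List Int)) (limit : Int) (out : Int) : Decidable (Spec_perfectMenu materials cookbooks attribute_ limit out) := by unfold Spec_perfectMenu; infer_instance

-- ===== CLAIM (what is proved, stated in full; the proofs are below) =====
def Claim_equal_perfectMenu : Prop := ∀ (materials : List Int) (cookbooks : List (List Int)) (attribute_ : List (List Int)) (limit : Int), Dom_perfectMenu materials cookbooks attribute_ limit → Pre_perfectMenu materials cookbooks attribute_ limit → Spec_perfectMenu materials cookbooks attribute_ limit (perfectMenu materials cookbooks attribute_ limit)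

-- ===== LEMMAS AND PROOFS =====

-- abstract state of a selection `path`, as B maintains it
def kOf (m : Nat) (cookbooks : List (List Int)) (path : List Nat) : Nat :=
  path.foldl (fun acc a => min acc (cookbooks.getD a []).length) m
def sumsOf (m : Nat) (cookbooks : List (List Int)) (path : List Nat) : List Int :=
  path.foldl (fun s a => addZip s (cookbooks.getD a [])) (List.replicate m 0)
def satOf (attribute_ : List (List Int)) (path : List Nat) : Int :=
  path.foldl (fun acc a => acc + (attribute_.getD a []).getD 1 0) 0
def delicOf (attribute_ : List (List Int)) (path : List Nat) : Int :=
  path.foldl (fun acc a => acc + (attribute_.getD a []).getD 0 0) 0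
def maxD : List Int → Int
  | [] => 0
  | x :: t => t.foldl max x
-- A's pruning check and record step, abstracted over the path
def chkA (materials : List Int) (cookbooks : List (List Int)) (path : List Nat) : Bool :=
  (materials.zip (zipStarSums (path.map (fun a => cookbooks.getD a [])))).any (fun q => q.1 < q.2)
def recA (attribute_ : List (List Int)) (limit : Int) (path : List Nat) (x : Int) : Int :=
  if 0 < path.length ∧ limit ≤ satOf attribute_ path then max x (delicOf attribute_ path) else x

theorem addZip_length : ∀ (s r : List Int), (addZip s r).length = min s.length r.length := by
  intro s r
  induction s generalizing r with
  | nil => cases r <;> simp [addZip]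
  | cons a t ih => cases r <;> simp [addZip, ih]

theorem addZip_getD {s r : List Int} {j : Nat} (hjs : j < s.length) (hjr : j < r.length) :
    (addZip s r).getD j 0 = s.getD j 0 + r.getD j 0 := by
  induction s generalizing r j with
  | nil => simp at hjs
  | cons a t ih =>
    cases r with
    | nil => simp at hjr
    | cons b u =>
      cases j with
      | zero => simp [addZip]
      | succ j => simpa [addZip] using ih (by simpa using hjs) (by simpa using hjr)

theorem foldl_min_le_init (g : Nat → Nat) : ∀ (t : List Nat) (x : Nat),
    t.foldl (fun acc a => min acc (g a)) x ≤ x := by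
  intro t
  induction t with
  | nil => simp
  | cons c u ih => intro x; exact le_trans (ih _) (min_le_left _ _)

theorem foldl_min_le_mem (g : Nat → Nat) : ∀ (t : List Nat) (x : Nat) (a : Nat), a ∈ t →
    t.foldl (fun acc b => min acc (g b)) x ≤ g a := by
  intro t
  induction t with
  | nil => simp
  | cons c u ih =>
    intro x a ha
    rcases List.mem_cons.mp ha with h | h
    · subst h; exact le_trans (foldl_min_le_init g u _) (min_le_right _ _)
    · exact ih _ a h

theorem foldl_min_min (g : Nat → Nat) : ∀ (t : List Nat) (x y : Nat),
    t.foldl (fun acc a => min acc (g a)) (min x y) =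
      min x (t.foldl (fun acc a => min acc (g a)) y) := by
  intro t
  induction t with
  | nil => simp
  | cons c u ih => intro x y; simpa [min_assoc] using ih x (min y (g c))

theorem getD_map_range (f : Nat → Int) {n j : Nat} (h : j < n) :
    (((List.range n).map f).getD j 0) = f j := by
  rw [List.getD_eq_getElem?_getD]
  simp [h]

theorem sumsOf_length (cookbooks : List (List Int)) : ∀ (path : List Nat) (s : List Int),
    (path.foldl (fun s a => addZip s (cookbooks.getD a [])) s).length =
      path.foldl (fun acc a => min acc (cookbooks.getD a []).length) s.length := by
  intro path
  induction path with
  | nil => simp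
  | cons a t ih => intro s; simpa [addZip_length] using ih (addZip s (cookbooks.getD a []))

theorem sumsOf_getD (cookbooks : List (List Int)) {j : Nat} :
    ∀ (path : List Nat) (s : List Int), j < s.length →
    (∀ a ∈ path, j < (cookbooks.getD a []).length) →
    (path.foldl (fun s a => addZip s (cookbooks.getD a [])) s).getD j 0 =
      s.getD j 0 + ((path.map (fun a => cookbooks.getD a [])).map (fun row => row.getD j 0)).sum := by
  intro path
  induction path with
  | nil => intro s _ _; simp
  | cons a t ih =>
    intro s hs hall
    have h1 : j < (cookbooks.getD a []).length := hall a (by simp)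
    have h2 : j < (addZip s (cookbooks.getD a [])).length := by
      rw [addZip_length]; omega
    simp only [List.foldl_cons, List.map_cons, List.sum_cons]
    rw [ih _ h2 (fun b hb => hall b (by simp [hb])), addZip_getD hs h1]
    ring

theorem any_zip_eq : ∀ (xs ys : List Int),
    ((xs.zip ys).any (fun p => p.1 < p.2)) =
      (List.range (min xs.length ys.length)).any (fun j => xs.getD j 0 < ys.getD j 0) := by
  intro xs
  induction xs with
  | nil => intro ys; simp
  | cons x t ih =>
    intro ys
    cases ys with
    | nil => simp
    | cons y u =>
      simp only [List.zip_cons_cons, List.any_cons, List.length_cons,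
        Nat.succ_min_succ, List.range_succ_eq_map, List.any_map, Function.comp_def]
      rw [ih u]
      simp only [List.getD, List.getElem?_cons_succ, List.getElem?_cons_zero, Option.getD_some]
      rfl

theorem any_congr_mem {α : Type} (l : List α) (p q : α → Bool) (h : ∀ x ∈ l, p x = q x) :
    l.any p = l.any q := by
  induction l with
  | nil => rfl
  | cons a t ih =>
    simp only [List.any_cons, h a (by simp), ih (fun x hx => h x (by simp [hx]))]

theorem maxD_append {res : List Int} (h : res ≠ []) (d : Int) :
    maxD (res ++ [d]) = max (maxD res) d := by
  cases res with
  | nil => exact absurd rfl h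
  | cons x t => simp [maxD, List.foldl_append]

theorem maxD_le_append {res : List Int} (h : res ≠ []) : ∀ (t : List Int),
    maxD res ≤ maxD (res ++ t) := by
  intro t
  induction t using List.reverseRecOn with
  | nil => simp
  | append_singleton u d ih =>
    have hne : res ++ u ≠ [] := by
      cases res with
      | nil => exact absurd rfl h
      | cons x v => simp
    calc maxD res ≤ maxD (res ++ u) := ih
      _ ≤ max (maxD (res ++ u)) d := le_max_left _ _
      _ = maxD (res ++ u ++ [d]) := (maxD_append hne d).symm
      _ = maxD (res ++ (u ++ [d])) := by rw [List.append_assoc]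

theorem dfsA_ne_nil (materials : List Int) (cookbooks attribute_ : List (List Int)) (limit : Int) (n : Nat) :
    ∀ (fuel i : Nat) (path : List Nat) (res : List Int), res ≠ [] →
    dfsA materials cookbooks attribute_ limit n fuel i path res ≠ [] := by
  intro fuel
  induction fuel with
  | zero => intro i path res h; simpa [dfsA] using h
  | succ fuel ih =>
    intro i path res h
    rw [dfsA]
    split
    · exact h
    · split
      · dsimp only
        split
        · simp
        · exact ih _ _ _ (ih _ _ _ (by simp))
      · dsimp only
        split
        · exact h
        · exact ih _ _ _ (ih _ _ _ h)

theorem dfsA_append (materials : List Int) (cookbooks attribute_ : List (List Int)) (limit : Int) (n : Nat) :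
    ∀ (fuel i : Nat) (path : List Nat) (res : List Int), ∃ t,
    dfsA materials cookbooks attribute_ limit n fuel i path res = res ++ t := by
  intro fuel
  induction fuel with
  | zero => intro i path res; exact ⟨[], by simp [dfsA]⟩
  | succ fuel ih =>
    intro i path res
    rw [dfsA]
    split
    · exact ⟨[], by simp⟩
    · dsimp only
      have hres1 : ∃ t0, (if 0 < path.length ∧ limit ≤ (path.map (fun a => (attribute_.getD a []).getD 1 0)).sum
          then res ++ [(path.map (fun a => (attribute_.getD a []).getD 0 0)).sum] else res) = res ++ t0 := by
        split
        · exact ⟨_, rfl⟩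
        · exact ⟨[], by simp⟩
      obtain ⟨t0, h0⟩ := hres1
      rw [h0]
      split
      · exact ⟨t0, rfl⟩
      · obtain ⟨t1, h1⟩ := ih (i + 1) (path ++ [i]) (res ++ t0)
        obtain ⟨t2, h2⟩ := ih (i + 1) path (res ++ t0 ++ t1)
        rw [h1, h2]
        exact ⟨t0 ++ t1 ++ t2, by simp⟩

theorem maxD_le_dfsA (materials : List Int) (cookbooks attribute_ : List (List Int)) (limit : Int)
    (n fuel i : Nat) (path : List Nat) {res : List Int} (h : res ≠ []) :
    maxD res ≤ maxD (dfsA materials cookbooks attribute_ limit n fuel i path res) := by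
  obtain ⟨t, ht⟩ := dfsA_append materials cookbooks attribute_ limit n fuel i path res
  rw [ht]
  exact maxD_le_append h t

-- the pruning test of A equals B's test on the incrementally maintained sums
theorem chkA_eq (materials : List Int) (cookbooks : List (List Int)) (a : Nat) (t : List Nat) :
    chkA materials cookbooks (a :: t) =
      (materials.zip (sumsOf materials.length cookbooks (a :: t))).any (fun q => q.1 < q.2) := by
  unfold chkA
  simp only [List.map_cons]
  set r0 := cookbooks.getD a [] with hr0
  set minrow := ((t.map (fun a => cookbooks.getD a [])).foldl
      (fun acc row => min acc row.length) r0.length) with hminrow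
  have hlen : (zipStarSums (r0 :: t.map (fun a => cookbooks.getD a []))).length = minrow := by
    simp [zipStarSums, hminrow]
  have hk : kOf materials.length cookbooks (a :: t) = min materials.length minrow := by
    simp only [kOf, List.foldl_cons, hminrow, List.foldl_map, hr0]
    exact foldl_min_min (fun b => (cookbooks.getD b []).length) t materials.length r0.length
  have hslen : (sumsOf materials.length cookbooks (a :: t)).length =
      kOf materials.length cookbooks (a :: t) := by
    rw [sumsOf, sumsOf_length]; simp [kOf]
  have hkle : kOf materials.length cookbooks (a :: t) ≤ materials.length :=
    foldl_min_le_init _ (a :: t) _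
  rw [any_zip_eq, any_zip_eq, hlen, hslen, ← hk,
    show min materials.length (kOf materials.length cookbooks (a :: t)) =
      kOf materials.length cookbooks (a :: t) from by omega]
  apply any_congr_mem
  intro j hj
  have hjk : j < kOf materials.length cookbooks (a :: t) := List.mem_range.mp hj
  have hjm : j < materials.length := lt_of_lt_of_le hjk hkle
  have hall : ∀ b ∈ a :: t, j < (cookbooks.getD b []).length := fun b hb =>
    lt_of_lt_of_le hjk (foldl_min_le_mem _ (a :: t) _ b hb)
  have hjmin : j < minrow := by
    have := hk ▸ hjk; omega
  have hz : (zipStarSums (r0 :: t.map (fun b => cookbooks.getD b []))).getD j 0 =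
      ((r0 :: t.map (fun b => cookbooks.getD b [])).foldl
        (fun acc row => acc + row.getD j 0) 0) := by
    simp only [zipStarSums, ← hminrow]
    exact getD_map_range _ hjmin
  have hsum : (sumsOf materials.length cookbooks (a :: t)).getD j 0 =
      ((r0 :: t.map (fun b => cookbooks.getD b [])).foldl
        (fun acc row => acc + row.getD j 0) 0) := by
    rw [sumsOf, sumsOf_getD cookbooks (a :: t) _ (by simpa using hjm) hall,
      PySem.List.foldl_add (l := r0 :: t.map (fun b => cookbooks.getD b []))
        (g := fun row : List Int => row.getD j 0) (a := (0 : Int))]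
    have hrep : (List.replicate materials.length (0 : Int)).getD j 0 = 0 := by
      rw [List.getD_eq_getElem?_getD, List.getElem?_replicate]
      split <;> rfl
    rw [hrep]
    simp [hr0]
  rw [hz, hsum]

theorem chkA_nil (materials : List Int) (cookbooks : List (List Int)) :
    chkA materials cookbooks [] = false := by
  simp [chkA, zipStarSums]

-- push step: B's incremental state update matches the path extension
theorem sumsOf_push (m : Nat) (cookbooks : List (List Int)) (path : List Nat) (i : Nat) :
    sumsOf m cookbooks (path ++ [i]) = addZip (sumsOf m cookbooks path) (cookbooks.getD i []) := by
  simp [sumsOf, List.foldl_append]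
theorem satOf_push (attribute_ : List (List Int)) (path : List Nat) (i : Nat) :
    satOf attribute_ (path ++ [i]) = satOf attribute_ path + (attribute_.getD i []).getD 1 0 := by
  simp [satOf, List.foldl_append]
theorem delicOf_push (attribute_ : List (List Int)) (path : List Nat) (i : Nat) :
    delicOf attribute_ (path ++ [i]) = delicOf attribute_ path + (attribute_.getD i []).getD 0 0 := by
  simp [delicOf, List.foldl_append]
theorem satOf_eq_sum (attribute_ : List (List Int)) (path : List Nat) :
    satOf attribute_ path = (path.map (fun a => (attribute_.getD a []).getD 1 0)).sum := by
  simpa [satOf] using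
    PySem.List.foldl_add (l := path) (g := fun a => (attribute_.getD a []).getD 1 0) (a := 0)
theorem delicOf_eq_sum (attribute_ : List (List Int)) (path : List Nat) :
    delicOf attribute_ path = (path.map (fun a => (attribute_.getD a []).getD 0 0)).sum := by
  simpa [delicOf] using
    PySem.List.foldl_add (l := path) (g := fun a => (attribute_.getD a []).getD 0 0) (a := 0)

-- A's record step computes recA on the running max
theorem record_eq (attribute_ : List (List Int)) (limit : Int) (path : List Nat)
    {res : List Int} (h : res ≠ []) :
    maxD (if 0 < path.length ∧ limit ≤ (path.map (fun a => (attribute_.getD a []).getD 1 0)).sum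
          then res ++ [(path.map (fun a => (attribute_.getD a []).getD 0 0)).sum] else res) =
      recA attribute_ limit path (maxD res) := by
  rw [recA, ← satOf_eq_sum, ← delicOf_eq_sum]
  split
  · rw [maxD_append h]
  · rfl

-- pickB ignores the exact fuel once it is positive and at least n - j
theorem pickB_fuel (materials : List Int) (cookbooks attribute_ : List (List Int)) (limit : Int) (n : Nat) :
    ∀ (f g j : Nat) (sums : List Int) (sat delic best : Int),
    1 ≤ f → 1 ≤ g → n ≤ j + f → n ≤ j + g →
    pickB materials cookbooks attribute_ limit n f j sums sat delic best =
      pickB materials cookbooks attribute_ limit n g j sums sat delic best := by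
  intro f
  induction f with
  | zero => intro g j _ _ _ _ hf; omega
  | succ f ih =>
    intro g j sums sat delic best _ hg hfb hgb
    cases g with
    | zero => omega
    | succ g =>
      rw [pickB, pickB]
      dsimp only
      split
      · rfl
      · apply PySem.List.foldl_congr_mem
        intro acc k hk
        have hk' : j + 1 ≤ k ∧ k < j + 1 + (n - (j + 1)) := by
          constructor
          · exact (List.mem_range'_1.mp hk).1
          · exact (List.mem_range'_1.mp hk).2
        exact ih g k _ _ _ acc (by omega) (by omega) (by omega) (by omega)

-- main induction: at every DFS node of A, the running max of A's result list equals B's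
-- continuation (prune; record; loop the next picks) on the incrementally maintained state
theorem dfs_eq (materials : List Int) (cookbooks attribute_ : List (List Int)) (limit : Int) (n : Nat) :
    ∀ (f i : Nat) (path : List Nat) (res : List Int), res ≠ [] → i + f = n + 1 → 1 ≤ f →
    maxD (dfsA materials cookbooks attribute_ limit n f i path res) =
      if chkA materials cookbooks path then maxD res
      else (List.range' i (n - i)).foldl
        (fun b k => pickB materials cookbooks attribute_ limit n n k
          (sumsOf materials.length cookbooks path) (satOf attribute_ path)
          (delicOf attribute_ path) b)
        (recA attribute_ limit path (maxD res)) := by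
  intro f
  induction f with
  | zero => intro i path res _ _ hf; omega
  | succ f ih =>
    intro i path res hres hif _
    rw [dfsA]
    by_cases hchk : chkA materials cookbooks path
    · rw [if_pos (by exact hchk), if_pos hchk]
    · rw [if_neg (by exact hchk), if_neg hchk]
      dsimp only
      set res1 := (if 0 < path.length ∧ limit ≤ (path.map (fun a => (attribute_.getD a []).getD 1 0)).sum
                   then res ++ [(path.map (fun a => (attribute_.getD a []).getD 0 0)).sum] else res) with hres1def
      have hres1ne : res1 ≠ [] := by
        rw [hres1def]; split <;> simp [hres]
      have hrec1 : maxD res1 = recA attribute_ limit path (maxD res) :=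
        record_eq attribute_ limit path hres
      by_cases hni : n < i + 1
      · rw [if_pos hni]
        have : n - i = 0 := by omega
        rw [this]
        simpa [List.range'] using hrec1
      · rw [if_neg hni]
        have hin : i < n := by omega
        have hf1 : i + 1 + f = n + 1 := by omega
        have hfge : 1 ≤ f := by omega
        -- the "take i" branch equals one pickB step
        set res2 := dfsA materials cookbooks attribute_ limit n f (i + 1) (path ++ [i]) res1 with hres2def
        have hres2ne : res2 ≠ [] := dfsA_ne_nil _ _ _ _ _ _ _ _ _ hres1ne
        have htake : maxD res2 =
            pickB materials cookbooks attribute_ limit n n i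
              (sumsOf materials.length cookbooks path) (satOf attribute_ path)
              (delicOf attribute_ path) (maxD res1) := by
          obtain ⟨n', hn'⟩ : ∃ n', n = n' + 1 := ⟨n - 1, by omega⟩
          have hceq : chkA materials cookbooks (path ++ [i]) =
              (materials.zip (sumsOf materials.length cookbooks (path ++ [i]))).any
                (fun q => q.1 < q.2) := by
            cases path with
            | nil => simpa using chkA_eq materials cookbooks i []
            | cons q u => simpa using chkA_eq materials cookbooks q (u ++ [i])
          rw [hres2def, ih (i + 1) (path ++ [i]) res1 hres1ne hf1 (by omega), hn', pickB]
          dsimp only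
          rw [← sumsOf_push, ← satOf_push, ← delicOf_push, ← hceq]
          by_cases hc : chkA materials cookbooks (path ++ [i])
          · rw [if_pos hc, if_pos hc]
          · rw [if_neg hc, if_neg hc]
            have hstart : (if limit ≤ satOf attribute_ (path ++ [i]) ∧
                  maxD res1 < delicOf attribute_ (path ++ [i])
                then delicOf attribute_ (path ++ [i]) else maxD res1) =
                recA attribute_ limit (path ++ [i]) (maxD res1) := by
              rw [recA]
              have hlen : 0 < (path ++ [i]).length := by simp
              by_cases hl : limit ≤ satOf attribute_ (path ++ [i])
              · by_cases hd : maxD res1 < delicOf attribute_ (path ++ [i])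
                · rw [if_pos ⟨hl, hd⟩, if_pos ⟨hlen, hl⟩, max_eq_right hd.le]
                · rw [if_neg (by tauto), if_pos ⟨hlen, hl⟩, max_eq_left (not_lt.mp hd)]
              · rw [if_neg (by tauto), if_neg (by tauto)]
            rw [hstart]
            apply Eq.symm
            apply PySem.List.foldl_congr_mem
            intro acc k hk
            have hk1 : i + 1 ≤ k := (List.mem_range'_1.mp hk).1
            have hk2 : k < i + 1 + (n' + 1 - (i + 1)) := (List.mem_range'_1.mp hk).2
            rw [hn'] at hin
            exact (pickB_fuel materials cookbooks attribute_ limit (n' + 1) n' (n' + 1) k _ _ _ acc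
              (by omega) (by omega) (by omega) (by omega))
        -- the "skip i" branch: one more node with the same path, then the remaining picks
        have hmono : maxD res1 ≤ maxD res2 := by
          rw [hres2def]; exact maxD_le_dfsA _ _ _ _ _ _ _ _ hres1ne
        have hnoop : recA attribute_ limit path (maxD res2) = maxD res2 := by
          rw [recA]
          split
          · rename_i hcond
            have hdle : delicOf attribute_ path ≤ maxD res1 := by
              rw [hrec1, recA, if_pos hcond]
              exact le_max_right _ _
            exact max_eq_left (le_trans hdle hmono)
          · rfl
        rw [ih (i + 1) path res2 hres2ne hf1 (by omega), if_neg hchk, hnoop]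
        have hrange : List.range' i (n - i) = i :: List.range' (i + 1) (n - (i + 1)) := by
          have h1 : n - i = (n - (i + 1)) + 1 := by omega
          rw [h1, List.range'_succ]
        rw [hrange, List.foldl_cons, ← hrec1, htake]

-- ===== VERDICT (by name: the statement is the Claim_ definition above) =====
theorem perfectMenu_spec : Claim_equal_perfectMenu := by
  intro materials cookbooks attribute_ limit _ _
  unfold Spec_perfectMenu perfectMenu perfectMenu_alt
  have h := dfs_eq materials cookbooks attribute_ limit cookbooks.length
    (cookbooks.length + 1) 0 [] [-1] (by simp) (by omega) (by omega)
  rw [chkA_nil] at h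
  simp only [Bool.false_eq_true, if_false, Nat.sub_zero, recA, satOf, delicOf, sumsOf,
    List.foldl_nil, List.length_nil, lt_irrefl, false_and] at h
  have hm : maxD [-1] = -1 := rfl
  rw [hm] at h
  dsimp only
  rw [← h]
  cases hr : dfsA materials cookbooks attribute_ limit cookbooks.length (cookbooks.length + 1) 0 [] [-1] with
  | nil => exact absurd hr (dfsA_ne_nil materials cookbooks attribute_ limit cookbooks.length _ _ _ _ (by simp))
  | cons x t =>
    rw [PySem.List.max?_id_cons]
    simp [maxD]
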